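-- pv_equiv track=rewrite | github.com/googleapis/releasetool | tests/common_test.py | repo_name_to_test_name
-- ===== SOURCE A (Python) =====
-- import string
--
-- def repo_name_to_test_name(repo_name: str) -> str:
--     letters = []
--     for letter in repo_name:
--         if letter in string.ascii_lowercase:
--             letters.append(letter)
--         elif letter in string.ascii_uppercase:
--             if letters:
--                 letters.append("_")
--             letters.append(letter.lower())
--         else:
--             letters.append("_")
--     return "test_guess_" + "".join(letters)
-- ===== SOURCE B (Python) =====
-- import re
--
-- def repo_name_to_test_name(repo_name: str) -> str:
--     s = re.sub(r'(?<=(?s:.))[A-Z]', r'_\g<0>', repo_name)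
--     s = s.lower()
--     s = re.sub(r'[^a-z]', '_', s)
--     return 'test_guess_' + s
-- ===== Notes on version B (the rewrite author's own statement) =====
-- stated objective: idiomatic
-- what changed: Replaces the character-by-character accumulator loop with a three-stage regex pipeline: insert an underscore before each non-initial ASCII uppercase letter, lowercase the whole string, then map every remaining character outside the ASCII lowercase range to an underscore.
import Mathlib
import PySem

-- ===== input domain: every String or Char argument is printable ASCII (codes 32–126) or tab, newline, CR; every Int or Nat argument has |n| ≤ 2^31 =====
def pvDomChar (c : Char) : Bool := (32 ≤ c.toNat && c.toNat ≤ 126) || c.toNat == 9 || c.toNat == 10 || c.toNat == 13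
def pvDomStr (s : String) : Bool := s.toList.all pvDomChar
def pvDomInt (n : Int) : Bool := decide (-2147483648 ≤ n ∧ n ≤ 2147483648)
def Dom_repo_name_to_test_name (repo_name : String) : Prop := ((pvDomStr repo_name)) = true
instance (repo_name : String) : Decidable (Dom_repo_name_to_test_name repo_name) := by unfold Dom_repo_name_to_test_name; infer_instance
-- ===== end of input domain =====

-- B replaces A's character-by-character accumulator loop with a three-stage pipeline
-- (insert '_' before non-initial uppercase; lowercase; map non-[a-z] to '_') — idiomatic, same cost.

-- ===== PORT A =====
-- one loop step: letter in ascii_lowercase / ascii_uppercase tested as the ASCII range checks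
-- (exact: membership of a single char in string.ascii_lowercase IS that range);
-- letter.lower() on an ASCII uppercase letter is PySem.Chars.lowerChar (exact there).
def pvStepA (acc : List Char) (c : Char) : List Char :=
  if 'a' ≤ c ∧ c ≤ 'z' then acc ++ [c]
  else if 'A' ≤ c ∧ c ≤ 'Z' then
    (if acc ≠ [] then acc ++ ['_'] else acc) ++ [PySem.Chars.lowerChar c]
  else acc ++ ['_']

def repo_name_to_test_name (repo_name : String) : String :=
  String.ofList ("test_guess_".toList ++ repo_name.toList.foldl pvStepA [])

-- ===== PORT B =====
-- stage 1: re.sub(r'(?<=(?s:.))[A-Z]', r'_\g<0>', s) — '_' before every uppercase not at index 0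
def pvInsUnd (c : Char) : List Char := if 'A' ≤ c ∧ c ≤ 'Z' then ['_', c] else [c]

def pvPass1 : List Char → List Char
  | [] => []
  | c :: rest => c :: rest.flatMap pvInsUnd

-- stage 3: re.sub(r'[^a-z]', '_', s)
def pvPass3 (c : Char) : Char := if 'a' ≤ c ∧ c ≤ 'z' then c else '_'

def repo_name_to_test_name_alt (repo_name : String) : String :=
  String.ofList ("test_guess_".toList ++
    (PySem.Chars.lower (pvPass1 repo_name.toList)).map pvPass3)

-- ===== PRECONDITION & SPEC =====
def Spec_repo_name_to_test_name (repo_name : String) (out : String) : Prop := out = repo_name_to_test_name_alt repo_name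
instance (repo_name : String) (out : String) : Decidable (Spec_repo_name_to_test_name repo_name out) := by unfold Spec_repo_name_to_test_name; infer_instance

-- ===== CLAIM (what is proved, stated in full; the proofs are below) =====
def Claim_equal_repo_name_to_test_name : Prop := ∀ (repo_name : String), Dom_repo_name_to_test_name repo_name → Spec_repo_name_to_test_name repo_name (repo_name_to_test_name repo_name)

-- ===== LEMMAS AND PROOFS =====

theorem char_le_iff (c d : Char) : c ≤ d ↔ c.toNat ≤ d.toNat := by
  rw [Char.le_def, UInt32.le_iff_toNat_le]; rfl

theorem lowerChar_toNat (c : Char) (h1 : 'A' ≤ c) (h2 : c ≤ 'Z') :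
    (PySem.Chars.lowerChar c).toNat = c.toNat + 32 := by
  have hv : (c.toNat + 32).isValidChar := by
    left
    have := (char_le_iff c 'Z').mp h2
    have hz : ('Z').toNat = 90 := by decide
    omega
  simp [PySem.Chars.lowerChar, PySem.Chars.isupper, h1, h2, Char.toNat_ofNat, hv]

theorem lowerChar_range (c : Char) (h1 : 'A' ≤ c) (h2 : c ≤ 'Z') :
    'a' ≤ PySem.Chars.lowerChar c ∧ PySem.Chars.lowerChar c ≤ 'z' := by
  have h := lowerChar_toNat c h1 h2
  have hA := (char_le_iff 'A' c).mp h1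
  have hZ := (char_le_iff c 'Z').mp h2
  have e1 : ('A').toNat = 65 := by decide
  have e2 : ('Z').toNat = 90 := by decide
  have e3 : ('a').toNat = 97 := by decide
  have e4 : ('z').toNat = 122 := by decide
  constructor <;> rw [char_le_iff] <;> omega

theorem lowerChar_fix (c : Char) (h : ¬ ('A' ≤ c ∧ c ≤ 'Z')) :
    PySem.Chars.lowerChar c = c := by
  simp [PySem.Chars.lowerChar, PySem.Chars.isupper]
  intro h1 h2; exact absurd ⟨h1, h2⟩ h

theorem lower_upper_disjoint (c : Char) (h : 'a' ≤ c ∧ c ≤ 'z') : ¬ ('A' ≤ c ∧ c ≤ 'Z') := by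
  have := (char_le_iff 'a' c).mp h.1
  have e3 : ('a').toNat = 97 := by decide
  have e2 : ('Z').toNat = 90 := by decide
  rintro ⟨-, h2⟩
  have := (char_le_iff c 'Z').mp h2
  omega

-- what B's two maps do to one character's stage-1 output
theorem pvPiece_eq (c : Char) :
    ((pvInsUnd c).map PySem.Chars.lowerChar).map pvPass3 =
      (if 'a' ≤ c ∧ c ≤ 'z' then [c]
       else if 'A' ≤ c ∧ c ≤ 'Z' then ['_', PySem.Chars.lowerChar c]
       else ['_']) := by
  by_cases hu : 'A' ≤ c ∧ c ≤ 'Z'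
  · obtain ⟨hr1, hr2⟩ := lowerChar_range c hu.1 hu.2
    have hl : ¬ ('a' ≤ c ∧ c ≤ 'z') := fun h => lower_upper_disjoint c h hu
    simp [pvInsUnd, pvPass3, hu, hl, hr1, hr2, lowerChar_fix '_' (by decide)]
  · rw [lowerChar_fix c hu]
    by_cases hl : 'a' ≤ c ∧ c ≤ 'z'
    · simp [pvInsUnd, pvPass3, hu, hl, lowerChar_fix c hu]
    · simp [pvInsUnd, pvPass3, hu, hl, lowerChar_fix c hu]

-- A's loop with a NONEMPTY accumulator appends exactly B's per-character pieces
theorem loopA_nonempty (cs : List Char) (acc : List Char) (h : acc ≠ []) :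
    cs.foldl pvStepA acc =
      acc ++ cs.flatMap (fun c => ((pvInsUnd c).map PySem.Chars.lowerChar).map pvPass3) := by
  induction cs generalizing acc with
  | nil => simp
  | cons c rest ih =>
    rw [List.foldl_cons, List.flatMap_cons, pvPiece_eq]
    have hstep : pvStepA acc c =
        acc ++ (if 'a' ≤ c ∧ c ≤ 'z' then [c]
                else if 'A' ≤ c ∧ c ≤ 'Z' then ['_', PySem.Chars.lowerChar c]
                else ['_']) := by
      unfold pvStepA
      split_ifs with h1 h2 <;> simp
    rw [hstep, ih _ (fun hx => h (List.append_eq_nil_iff.mp hx).1), List.append_assoc]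

theorem repo_name_to_test_name_eq (repo_name : String) :
    repo_name_to_test_name repo_name = repo_name_to_test_name_alt repo_name := by
  unfold repo_name_to_test_name repo_name_to_test_name_alt
  cases hcs : repo_name.toList with
  | nil => rfl
  | cons c rest =>
    rw [List.foldl_cons]
    have hfirst : pvStepA [] c =
        [pvPass3 (PySem.Chars.lowerChar c)] := by
      unfold pvStepA pvPass3
      by_cases hu : 'A' ≤ c ∧ c ≤ 'Z'
      · obtain ⟨hr1, hr2⟩ := lowerChar_range c hu.1 hu.2
        have hl : ¬ ('a' ≤ c ∧ c ≤ 'z') := fun h => lower_upper_disjoint c h hu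
        simp [hu, hl, hr1, hr2]
      · rw [lowerChar_fix c hu]
        by_cases hl : 'a' ≤ c ∧ c ≤ 'z' <;> simp [hu, hl]
    have hne : pvStepA [] c ≠ [] := by rw [hfirst]; simp
    rw [loopA_nonempty rest _ hne, hfirst]
    simp only [pvPass1, PySem.Chars.lower, List.map_cons, List.map_flatMap]
    rfl

-- ===== VERDICT (by name: the statement is the Claim_ definition above) =====
theorem repo_name_to_test_name_spec : Claim_equal_repo_name_to_test_name := by
  intro s _
  unfold Spec_repo_name_to_test_name
  exact repo_name_to_test_name_eq s
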